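-- pv_equiv track=rewrite | github.com/paulttt/Approximate-Dynamic-Programming-and-Reinforcement-Learning | Assignment03/Assignment3/scheduler.py | create_one_q
-- ===== SOURCE A (Python) =====
-- def create_one_q(T):
--     qstates = []
--     for i in range(T + 1):
--         end1 = T + 1 if i != 0 else 1
--         for j in range(end1):
--             end2 = T + 1 if j != 0 else 1
--             for k in range(end2):
--                 qstates.append((i, j, k))
--     return qstates
-- ===== SOURCE B (Python) =====
-- def create_one_q(T):
--     n = T + 1
--     return [(m // (n * n), m // n % n, m % n)
--             for m in range(n * n * n)
--             if (m // (n * n) != 0 or m // n % n == 0)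
--             and (m // n % n != 0 or m % n == 0)]
-- ===== Notes on version B (the rewrite author's own statement) =====
-- stated objective: alternative
-- what changed: Replaces A's three nested loops with shrinking bounds by a single flat loop over range((T+1)^3) that decodes each index m into the triple (m//n^2, m//n%n, m%n) and keeps it when the implication constraints (i==0 => j==0) and (j==0 => k==0) hold.
import Mathlib
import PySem

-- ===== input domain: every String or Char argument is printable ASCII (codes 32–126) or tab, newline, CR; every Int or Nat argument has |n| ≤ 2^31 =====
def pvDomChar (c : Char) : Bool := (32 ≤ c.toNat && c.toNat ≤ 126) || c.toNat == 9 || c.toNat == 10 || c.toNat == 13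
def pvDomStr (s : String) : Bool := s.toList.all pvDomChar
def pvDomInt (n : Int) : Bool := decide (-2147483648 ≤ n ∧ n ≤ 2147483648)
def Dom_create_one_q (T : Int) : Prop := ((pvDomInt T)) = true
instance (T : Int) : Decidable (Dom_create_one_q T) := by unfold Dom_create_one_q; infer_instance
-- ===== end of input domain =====

-- B replaces A's three nested loops (with shrinking inner bounds) by a single flat loop over
-- range((T+1)^3) that decodes each index into a triple and filters by the implication constraints
-- (an alternative decomposition; same output, same asymptotic cost).

-- ===== PORT A =====
def create_one_q (T : Int) : List (Int × Int × Int) :=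
  (PySem.List.pyRange 0 (T + 1) 1).foldl (fun qstates i =>
    let end1 : Int := if i ≠ 0 then T + 1 else 1
    (PySem.List.pyRange 0 end1 1).foldl (fun acc j =>
      let end2 : Int := if j ≠ 0 then T + 1 else 1
      (PySem.List.pyRange 0 end2 1).foldl (fun acc2 k => acc2 ++ [(i, j, k)]) acc) qstates) []

-- ===== PORT B =====
def create_one_q_alt (T : Int) : List (Int × Int × Int) :=
  let n : Int := T + 1
  (PySem.List.pyRange 0 (n * n * n) 1).flatMap (fun m =>
    if (PySem.Int.floordiv m (n * n) ≠ 0 ∨ PySem.Int.mod (PySem.Int.floordiv m n) n = 0)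
       ∧ (PySem.Int.mod (PySem.Int.floordiv m n) n ≠ 0 ∨ PySem.Int.mod m n = 0) then
      [(PySem.Int.floordiv m (n * n), PySem.Int.mod (PySem.Int.floordiv m n) n, PySem.Int.mod m n)]
    else [])

-- ===== PRECONDITION & SPEC =====
def Spec_create_one_q (T : Int) (out : List (Int × Int × Int)) : Prop := out = create_one_q_alt T
instance (T : Int) (out : List (Int × Int × Int)) : Decidable (Spec_create_one_q T out) := by unfold Spec_create_one_q; infer_instance

-- ===== CLAIM (what is proved, stated in full; the proofs are below) =====
def Claim_equal_create_one_q : Prop := ∀ (T : Int), Dom_create_one_q T → Spec_create_one_q T (create_one_q T)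

-- ===== LEMMAS AND PROOFS =====

-- the Nat-level cube of triples below N in lexicographic order
def natCube (N : Nat) : List (Nat × Nat × Nat) :=
  (List.range N).flatMap (fun i => (List.range N).flatMap (fun j =>
    (List.range N).map (fun k => (i, j, k))))

-- the Nat-level canonical form of A's nested loops with shrinking bounds
def natCanon (N : Nat) : List (Nat × Nat × Nat) :=
  (List.range N).flatMap (fun i =>
    (if i = 0 then [0] else List.range N).flatMap (fun j =>
      (if j = 0 then [0] else List.range N).map (fun k => (i, j, k))))

def castT (t : Nat × Nat × Nat) : Int × Int × Int := ((t.1 : Int), (t.2.1 : Int), (t.2.2 : Int))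

theorem range_mul (a b : Nat) :
    List.range (a * b) = (List.range a).flatMap (fun i => (List.range b).map (fun r => b * i + r)) := by
  induction a with
  | zero => simp
  | succ a ih =>
    rw [Nat.succ_mul, List.range_add, ih, List.range_succ, List.flatMap_append]
    simp [Nat.mul_comm]

theorem decode2 (N : Nat) (i : Nat) :
    (List.range (N * N)).map (fun r => (i, r / N, r % N)) =
    (List.range N).flatMap (fun j => (List.range N).map (fun k => (i, j, k))) := by
  rw [range_mul N N, List.map_flatMap]
  refine List.flatMap_congr ?_
  intro j _
  rw [List.map_map]
  refine List.map_congr_left ?_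
  intro s hs
  have hsN : s < N := List.mem_range.mp hs
  have hN : 0 < N := by omega
  simp [Function.comp, Nat.mul_add_div hN, Nat.div_eq_of_lt hsN, Nat.mod_eq_of_lt hsN]

theorem decode3 (N : Nat) :
    (List.range (N * N * N)).map (fun m => (m / (N * N), m / N % N, m % N)) = natCube N := by
  unfold natCube
  rw [show N * N * N = N * (N * N) by ring, range_mul N (N * N), List.map_flatMap]
  refine List.flatMap_congr ?_
  intro i _
  rw [List.map_map, ← decode2 N i]
  refine List.map_congr_left ?_
  intro r hr
  have hrN : r < N * N := List.mem_range.mp hr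
  have hN : 0 < N := by
    rcases Nat.eq_zero_or_pos N with h | h
    · subst h; simp at hrN
    · exact h
  have hNN : 0 < N * N := Nat.mul_pos hN hN
  have h1 : (N * N * i + r) / (N * N) = i := by
    rw [Nat.mul_add_div hNN, Nat.div_eq_of_lt hrN, Nat.add_zero]
  have h2 : (N * N * i + r) / N % N = r / N := by
    rw [show N * N * i = N * (N * i) by ring, Nat.mul_add_div hN, Nat.mul_add_mod,
      Nat.mod_eq_of_lt (Nat.div_lt_of_lt_mul (by omega))]
  have h3 : (N * N * i + r) % N = r % N := by
    rw [show N * N * i = N * (N * i) by ring, Nat.mul_add_mod]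
  simp [h1, h2, h3]

theorem filter_eq_zero_singleton (N : Nat) (hN : 0 < N) :
    (List.range N).filter (fun k => decide (k = 0)) = [0] := by
  obtain ⟨M, rfl⟩ : ∃ M, N = M + 1 := ⟨N - 1, by omega⟩
  rw [List.range_succ_eq_map]
  simp [List.filter_eq_nil_iff]

theorem filter_cube (N : Nat) (hN : 0 < N) :
    (natCube N).filter (fun t => decide ((t.1 ≠ 0 ∨ t.2.1 = 0) ∧ (t.2.1 ≠ 0 ∨ t.2.2 = 0))) =
    natCanon N := by
  unfold natCube natCanon
  rw [List.filter_flatMap]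
  refine List.flatMap_congr ?_
  intro i _
  rw [List.filter_flatMap]
  by_cases hi0 : i = 0
  · subst hi0
    rw [if_pos rfl]
    have key : ∀ (g : Nat → List (Nat × Nat × Nat)), (∀ j, j ≠ 0 → g j = []) →
        (List.range N).flatMap g = g 0 := by
      intro g hg
      obtain ⟨M, rfl⟩ : ∃ M, N = M + 1 := ⟨N - 1, by omega⟩
      rw [List.range_succ_eq_map, List.flatMap_cons, List.flatMap_map]
      have hnil : (List.range M).flatMap (fun a => g (Nat.succ a)) = [] := by
        simp only [List.flatMap_eq_nil_iff]
        intro a _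
        exact hg _ (Nat.succ_ne_zero a)
      rw [hnil, List.append_nil]
    rw [key _ (by intro j hj; simp [List.filter_eq_nil_iff, hj])]
    rw [List.filter_map]
    have hcomp : ((fun t : Nat × Nat × Nat => decide ((t.1 ≠ 0 ∨ t.2.1 = 0) ∧ (t.2.1 ≠ 0 ∨ t.2.2 = 0)))
        ∘ (fun k => ((0 : Nat), (0 : Nat), k))) = fun k => decide (k = 0) := by
      funext k; simp
    rw [hcomp, filter_eq_zero_singleton N hN]
    simp
  · rw [if_neg hi0]
    refine List.flatMap_congr ?_
    intro j _
    rw [List.filter_map]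
    by_cases hj0 : j = 0
    · subst hj0
      have hc : ((fun t : Nat × Nat × Nat => decide ((t.1 ≠ 0 ∨ t.2.1 = 0) ∧ (t.2.1 ≠ 0 ∨ t.2.2 = 0)))
          ∘ (fun k => (i, (0 : Nat), k))) = fun k => decide (k = 0) := by
        funext k; simp [hi0]
      rw [hc, filter_eq_zero_singleton N hN]
      simp
    · rw [if_neg hj0]
      have hc : ((fun t : Nat × Nat × Nat => decide ((t.1 ≠ 0 ∨ t.2.1 = 0) ∧ (t.2.1 ≠ 0 ∨ t.2.2 = 0)))
          ∘ (fun k => (i, j, k))) = fun _ => true := by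
        funext k; simp [hi0, hj0]
      rw [hc, List.filter_true]

theorem A_eq (T : Int) (N : Nat) (h : T + 1 = (N : Int)) :
    create_one_q T = (natCanon N).map castT := by
  have h1 : PySem.List.pyRange 0 1 1 = [0] := by decide
  simp only [create_one_q]
  simp only [PySem.List.foldl_append_singleton_eq_map, PySem.List.foldl_append_eq_flatMap,
    List.nil_append]
  simp only [h, PySem.List.pyRange_zero_nat]
  unfold natCanon castT
  simp only [List.flatMap_map, List.map_flatMap, List.map_map]
  refine List.flatMap_congr ?_
  intro i _
  by_cases hi0 : i = 0
  · subst hi0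
    simp [h1]
  · simp only [Function.comp_def, Nat.cast_eq_zero, hi0, ite_not, if_false]
    simp only [PySem.List.pyRange_zero_nat, List.flatMap_map]
    refine List.flatMap_congr ?_
    intro j _
    by_cases hj0 : j = 0
    · subst hj0; simp [h1]
    · simp [Function.comp_def, hj0, PySem.List.pyRange_zero_nat]

theorem flatMap_if_spec (l : List Nat) (f1 f2 f3 : Nat → Nat) :
    l.flatMap (fun m => if (f1 m ≠ 0 ∨ f2 m = 0) ∧ (f2 m ≠ 0 ∨ f3 m = 0) then
        [((f1 m : Int), (f2 m : Int), (f3 m : Int))] else [])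
    = ((l.map (fun m => (f1 m, f2 m, f3 m))).filter
        (fun t => decide ((t.1 ≠ 0 ∨ t.2.1 = 0) ∧ (t.2.1 ≠ 0 ∨ t.2.2 = 0)))).map castT := by
  induction l with
  | nil => simp
  | cons x xs ih =>
    simp only [List.flatMap_cons, List.map_cons, List.filter_cons, ih]
    by_cases hx : (f1 x ≠ 0 ∨ f2 x = 0) ∧ (f2 x ≠ 0 ∨ f3 x = 0)
    · simp [hx, castT]
    · simp [hx]

theorem B_eq (T : Int) (N : Nat) (h : T + 1 = (N : Int)) (hN : 0 < N) :
    create_one_q_alt T = (natCanon N).map castT := by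
  simp only [create_one_q_alt, h]
  rw [show ((N : Int) * N * N) = ((N * N * N : Nat) : Int) by push_cast; ring]
  rw [PySem.List.pyRange_zero_nat, List.flatMap_map]
  rw [show ((N : Int) * N) = ((N * N : Nat) : Int) by push_cast; ring]
  simp only [PySem.Int.floordiv_natCast, PySem.Int.mod_natCast, Nat.cast_eq_zero, Nat.cast_ne_zero]
  rw [flatMap_if_spec (List.range (N * N * N)) (fun m => m / (N * N)) (fun m => m / N % N)
    (fun m => m % N)]
  rw [decode3, filter_cube N hN]

theorem empty_case (T : Int) (h : T + 1 ≤ 0) : create_one_q T = [] ∧ create_one_q_alt T = [] := by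
  constructor
  · simp [create_one_q, PySem.List.pyRange_one_eq_nil h]
  · have h3 : (T + 1) * (T + 1) * (T + 1) ≤ 0 := by nlinarith
    simp [create_one_q_alt, PySem.List.pyRange_one_eq_nil h3]

-- ===== VERDICT (by name: the statement is the Claim_ definition above) =====
theorem create_one_q_spec : Claim_equal_create_one_q := by
  intro T _
  unfold Spec_create_one_q
  rcases le_or_gt (T + 1) 0 with h | h
  · rcases empty_case T h with ⟨hA, hB⟩; rw [hA, hB]
  · obtain ⟨N, hN⟩ : ∃ N : Nat, T + 1 = (N : Int) := ⟨(T + 1).toNat, by omega⟩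
    have hNpos : 0 < N := by omega
    rw [A_eq T N hN, B_eq T N hN hNpos]
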